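-- pv_equiv track=rewrite | github.com/austincoveney/uk_business_lead_generator-main | src/utils/export_manager.py | _get_standardized_fieldnames
-- ===== SOURCE A (Python) =====
-- def _get_standardized_fieldnames(businesses):
--     """Get standardized fieldnames for CSV export"""
--     # Define preferred field order
--     preferred_fields = [
--         'name', 'website', 'phone', 'email', 'address',
--         'performance_score', 'seo_score', 'accessibility_score', 'best_practices_score',
--         'priority', 'business_type', 'description'
--     ]
--
--     # Get all unique fields
--     all_fields = set()
--     for business in businesses:
--         all_fields.update(business.keys())
--
--     # Order fields: preferred first, then alphabetical
--     ordered_fields = []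
--     for field in preferred_fields:
--         if field in all_fields:
--             ordered_fields.append(field)
--             all_fields.remove(field)
--
--     # Add remaining fields alphabetically
--     ordered_fields.extend(sorted(all_fields))
--     return ordered_fields
-- ===== SOURCE B (Python) =====
-- def _get_standardized_fieldnames(businesses):
--     """Get standardized fieldnames for CSV export"""
--     preferred_fields = [
--         'name', 'website', 'phone', 'email', 'address',
--         'performance_score', 'seo_score', 'accessibility_score', 'best_practices_score',
--         'priority', 'business_type', 'description'
--     ]
--     rank = {f: i for i, f in enumerate(preferred_fields)}
--     n = len(preferred_fields)
--
--     all_fields = set()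
--     for business in businesses:
--         all_fields.update(business.keys())
--
--     # One keyed sort: preferred fields first in their defined order, the rest alphabetical.
--     return sorted(all_fields, key=lambda f: (rank.get(f, n), f))
-- ===== Notes on version B (the rewrite author's own statement) =====
-- stated objective: idiomatic
-- what changed: Replaces A's two-phase partition (explicit preferred loop with set.remove, then a separate sorted() on the remainder) by a single keyed sort over a rank table built once.
import Mathlib
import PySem

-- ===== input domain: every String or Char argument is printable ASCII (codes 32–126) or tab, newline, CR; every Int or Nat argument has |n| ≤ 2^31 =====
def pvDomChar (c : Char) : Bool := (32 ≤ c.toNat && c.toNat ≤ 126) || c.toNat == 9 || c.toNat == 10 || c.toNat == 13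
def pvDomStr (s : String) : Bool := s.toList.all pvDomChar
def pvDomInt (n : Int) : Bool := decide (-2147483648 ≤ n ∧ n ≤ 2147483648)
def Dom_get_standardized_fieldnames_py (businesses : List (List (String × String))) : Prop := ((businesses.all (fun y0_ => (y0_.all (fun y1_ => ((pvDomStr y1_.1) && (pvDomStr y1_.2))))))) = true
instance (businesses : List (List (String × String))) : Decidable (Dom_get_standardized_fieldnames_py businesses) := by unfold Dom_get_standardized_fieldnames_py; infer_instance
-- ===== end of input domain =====

-- B replaces A's two-phase partition (preferred loop with remove + sorted remainder) by one keyed sort over a rank table.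


-- ===== PORT A =====
-- the preferred_fields literal (identical in both Pythons)
def pvPreferred : List String :=
  ["name", "website", "phone", "email", "address",
   "performance_score", "seo_score", "accessibility_score", "best_practices_score",
   "priority", "business_type", "description"]

def get_standardized_fieldnames_py (businesses : List (List (String × String))) : List String :=
  -- all_fields = set(); for business: all_fields.update(business.keys())
  let all_fields : PySem.Set String :=
    businesses.foldl (fun s business => PySem.Set.update s (business.map Prod.fst)) PySem.Set.empty
  -- for field in preferred_fields: if field in all_fields: append; all_fields.remove(field)
  -- (remove is guarded by the membership test, so it never raises: discard is exact here)
  let st : List String × PySem.Set String :=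
    pvPreferred.foldl
      (fun st field =>
        if PySem.Set.contains st.2 field then (st.1 ++ [field], PySem.Set.discard st.2 field)
        else st)
      ([], all_fields)
  -- ordered_fields.extend(sorted(all_fields)); sorted without key is order-independent on a set
  st.1 ++ PySem.List.sorted st.2 (fun x => x)

-- ===== PORT B =====
-- rank = {f: i for i, f in enumerate(preferred_fields)}
def pvRank : PySem.Dict String Int :=
  (PySem.List.enumerate pvPreferred).foldl (fun d p => PySem.Dict.insert d p.2 p.1) PySem.Dict.empty

def get_standardized_fieldnames_py_alt (businesses : List (List (String × String))) : List String :=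
  let n : Int := (pvPreferred.length : Int)
  let all_fields : PySem.Set String :=
    businesses.foldl (fun s business => PySem.Set.update s (business.map Prod.fst)) PySem.Set.empty
  -- sorted(all_fields, key=lambda f: (rank.get(f, n), f)); the Python tuple order is the
  -- lexicographic order on Int × String, and the key is injective, so the set's order is immaterial
  PySem.List.sorted all_fields (fun f => toLex ((PySem.Dict.getD pvRank f n : Int), f))

-- ===== PRECONDITION & SPEC =====
def Spec_get_standardized_fieldnames_py (businesses : List (List (String × String))) (out : List String) : Prop := out = get_standardized_fieldnames_py_alt businesses
instance (businesses : List (List (String × String))) (out : List String) : Decidable (Spec_get_standardized_fieldnames_py businesses out) := by unfold Spec_get_standardized_fieldnames_py; infer_instance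

-- ===== CLAIM (what is proved, stated in full; the proofs are below) =====
def Claim_equal_get_standardized_fieldnames_py : Prop := ∀ (businesses : List (List (String × String))), Dom_get_standardized_fieldnames_py businesses → Spec_get_standardized_fieldnames_py businesses (get_standardized_fieldnames_py businesses)

-- ===== LEMMAS AND PROOFS =====

-- the shared key function of B's sort
def pvKey (f : String) : Lex (Int × String) := toLex ((PySem.Dict.getD pvRank f (pvPreferred.length : Int) : Int), f)

-- rank lookup of a non-preferred field is the default 12
theorem pvRank_not_mem (f : String) (h : f ∉ pvPreferred) :
    PySem.Dict.getD pvRank f (pvPreferred.length : Int) = 12 := by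
  simp only [pvPreferred, List.mem_cons, List.not_mem_nil, or_false, not_or] at h
  obtain ⟨h1, h2, h3, h4, h5, h6, h7, h8, h9, h10, h11, h12⟩ := h
  have e : pvRank = ⟨[("name", 0), ("website", 1), ("phone", 2), ("email", 3), ("address", 4),
      ("performance_score", 5), ("seo_score", 6), ("accessibility_score", 7),
      ("best_practices_score", 8), ("priority", 9), ("business_type", 10), ("description", 11)]⟩ := by
    decide
  rw [show ((pvPreferred.length : Int)) = 12 from by decide]
  apply PySem.Dict.getD_of_not_contains
  simp [e, PySem.Dict.contains,
    Ne.symm h1, Ne.symm h2, Ne.symm h3, Ne.symm h4, Ne.symm h5, Ne.symm h6, Ne.symm h7,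
    Ne.symm h8, Ne.symm h9, Ne.symm h10, Ne.symm h11, Ne.symm h12]

-- rank of a preferred field is below 12
theorem pvRank_mem_lt (f : String) (h : f ∈ pvPreferred) :
    PySem.Dict.getD pvRank f (pvPreferred.length : Int) < 12 := by
  fin_cases h <;> decide

-- the set of all keys is duplicate-free
theorem nodup_foldl_update (bs : List (List (String × String))) (s : PySem.Set String)
    (hs : s.Nodup) :
    (bs.foldl (fun s business => PySem.Set.update s (business.map Prod.fst)) s).Nodup := by
  induction bs generalizing s with
  | nil => exact hs
  | cons b t ih => exact ih _ (PySem.Set.nodup_update _ _ hs)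

theorem discard_of_not_mem (s : PySem.Set String) (p : String) (h : p ∉ s) :
    PySem.Set.discard s p = s := by
  rw [PySem.Set.discard.eq_1]
  apply List.filter_eq_self.mpr
  intro a ha
  simp only [Bool.not_eq_eq_eq_not, Bool.not_true, beq_eq_false_iff_ne]
  exact fun e => h (e ▸ ha)

theorem contains_discard_of_ne (s : PySem.Set String) (p f : String) (h : f ≠ p) :
    PySem.Set.contains (PySem.Set.discard s p) f = PySem.Set.contains s f := by
  simp [PySem.Set.mem_discard, h]

theorem mem_foldl_discard (P : List String) (s : PySem.Set String) (y : String) :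
    y ∈ P.foldl (fun t f => PySem.Set.discard t f) s ↔ y ∈ s ∧ y ∉ P := by
  induction P generalizing s with
  | nil => simp
  | cons p t ih => simp [List.foldl_cons, ih, PySem.Set.mem_discard]; tauto

theorem nodup_foldl_discard (P : List String) (s : PySem.Set String) (hs : s.Nodup) :
    (P.foldl (fun t f => PySem.Set.discard t f) s).Nodup := by
  induction P generalizing s with
  | nil => exact hs
  | cons p t ih => exact ih _ (PySem.Set.nodup_discard _ _ hs)

-- A's preferred loop, characterised: appended part = filter, remaining set = s minus P
theorem loopA (P : List String) (acc : List String) (s : PySem.Set String) (hP : P.Nodup) :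
    (P.foldl
      (fun st field =>
        if PySem.Set.contains st.2 field then (st.1 ++ [field], PySem.Set.discard st.2 field)
        else st)
      (acc, s)) =
    (acc ++ P.filter (fun f => PySem.Set.contains s f),
      P.foldl (fun t f => PySem.Set.discard t f) s) := by
  induction P generalizing acc s with
  | nil => simp
  | cons p t ih =>
    rcases List.nodup_cons.mp hP with ⟨hp, ht⟩
    by_cases hmem : PySem.Set.contains s p
    · rw [List.foldl_cons, if_pos hmem, ih _ _ ht]
      rw [List.foldl_cons, List.filter_cons_of_pos (by simpa using hmem)]
      have h2 : t.filter (fun f => PySem.Set.contains (PySem.Set.discard s p) f)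
           = t.filter (fun f => PySem.Set.contains s f) := by
        apply List.filter_congr
        intro f hf
        exact contains_discard_of_ne s p f (fun e => hp (e ▸ hf))
      rw [h2]
      simp
    · rw [List.foldl_cons, if_neg hmem, ih _ _ ht]
      have hps : p ∉ s := fun hin => hmem ((PySem.Set.contains_iff s p).mpr hin)
      rw [List.foldl_cons, List.filter_cons_of_neg (by simpa using hmem),
        discard_of_not_mem s p hps]

-- lexicographic strict order from the components
theorem keylt_of_fst_lt (a b : Int × String) (h : a.1 < b.1) : toLex a < toLex b := by
  rw [Prod.Lex.lt_iff]; exact Or.inl h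

theorem keylt_of_snd_lt (a b : Int × String) (h1 : a.1 = b.1) (h2 : a.2 < b.2) :
    toLex a < toLex b := by
  rw [Prod.Lex.lt_iff]; exact Or.inr ⟨h1, h2⟩

-- the ranks of the preferred fields are strictly increasing along pvPreferred
theorem pvPreferred_rank_pairwise :
    pvPreferred.Pairwise
      (fun a b => PySem.Dict.getD pvRank a (pvPreferred.length : Int)
                < PySem.Dict.getD pvRank b (pvPreferred.length : Int)) := by
  decide

theorem pvPreferred_nodup : pvPreferred.Nodup := by decide

-- the core equality, over an arbitrary duplicate-free set of fields
theorem main_eq (S : PySem.Set String) (hSnd : S.Nodup) :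
    (pvPreferred.foldl
      (fun st field =>
        if PySem.Set.contains st.2 field then (st.1 ++ [field], PySem.Set.discard st.2 field)
        else st)
      (([] : List String), S)).1 ++
      PySem.List.sorted
        (pvPreferred.foldl
          (fun st field =>
            if PySem.Set.contains st.2 field then (st.1 ++ [field], PySem.Set.discard st.2 field)
            else st)
          (([] : List String), S)).2 (fun x => x)
    = PySem.List.sorted S
        (fun f => toLex ((PySem.Dict.getD pvRank f (pvPreferred.length : Int) : Int), f)) := by
  rw [loopA _ _ _ pvPreferred_nodup]
  set key : String → Lex (Int × String) :=
    fun f => toLex ((PySem.Dict.getD pvRank f (pvPreferred.length : Int) : Int), f) with hkey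
  set F : List String := pvPreferred.filter (fun f => PySem.Set.contains S f) with hF
  set R : PySem.Set String := pvPreferred.foldl (fun t f => PySem.Set.discard t f) S with hR
  have hRmem : ∀ y, y ∈ R ↔ y ∈ S ∧ y ∉ pvPreferred := fun y => mem_foldl_discard _ _ y
  have hRnd : R.Nodup := nodup_foldl_discard _ _ hSnd
  have hFmem : ∀ y, y ∈ F ↔ y ∈ pvPreferred ∧ y ∈ S := by
    intro y; simp [hF, List.mem_filter]
  have hsRmem : ∀ y, y ∈ PySem.List.sorted R (fun x => x) ↔ y ∈ R := fun y =>
    PySem.List.mem_sorted R (fun x => x) false y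
  have hsRnd : (PySem.List.sorted R (fun x => x)).Nodup :=
    ((PySem.List.sorted_perm R (fun x => x) false).nodup_iff).mpr hRnd
  have hFnd : F.Nodup := pvPreferred_nodup.filter _
  have hynd : (F ++ PySem.List.sorted R (fun x => x)).Nodup := by
    rw [List.nodup_append]
    refine ⟨hFnd, hsRnd, ?_⟩
    intro a haF b hbs
    have h1 := (hFmem a).mp haF
    have h2 := (hRmem b).mp ((hsRmem b).mp hbs)
    exact fun e => h2.2 (e ▸ h1.1)
  have hperm : (F ++ PySem.List.sorted R (fun x => x)).Perm S := by
    rw [List.perm_ext_iff_of_nodup hynd hSnd]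
    intro a
    simp only [List.mem_append, hFmem a, hsRmem a, hRmem a]
    by_cases hp : a ∈ pvPreferred <;> by_cases hsm : a ∈ S <;> simp [hp, hsm]
  have hpair : (F ++ PySem.List.sorted R (fun x => x)).Pairwise (fun a b => key a < key b) := by
    rw [List.pairwise_append]
    refine ⟨?_, ?_, ?_⟩
    · have h0 : F.Pairwise
          (fun a b => PySem.Dict.getD pvRank a (pvPreferred.length : Int)
                    < PySem.Dict.getD pvRank b (pvPreferred.length : Int)) :=
        pvPreferred_rank_pairwise.sublist List.filter_sublist
      exact h0.imp (fun h => keylt_of_fst_lt _ _ h)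
    · have hle := PySem.List.sorted_pairwise R (fun x => x)
      have hne : (PySem.List.sorted R (fun x => x)).Pairwise (· ≠ ·) := hsRnd
      have hlt := hle.and hne
      refine hlt.imp_of_mem ?_
      intro a b ha hb ⟨h1, h2⟩
      have hA := (hRmem a).mp ((hsRmem a).mp ha)
      have hB := (hRmem b).mp ((hsRmem b).mp hb)
      rw [hkey]
      apply keylt_of_snd_lt
      · simp [pvRank_not_mem a hA.2, pvRank_not_mem b hB.2]
      · exact lt_of_le_of_ne h1 h2
    · intro a haF b hbR
      have hA := (hFmem a).mp haF
      have hB := (hRmem b).mp ((hsRmem b).mp hbR)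
      rw [hkey]
      apply keylt_of_fst_lt
      show PySem.Dict.getD pvRank a (pvPreferred.length : Int)
         < PySem.Dict.getD pvRank b (pvPreferred.length : Int)
      rw [pvRank_not_mem b hB.2]
      exact pvRank_mem_lt a hA.1
  simpa using (PySem.List.sorted_eq_of_perm_of_pairwise_lt S _ key hperm hpair).symm

-- ===== VERDICT (by name: the statement is the Claim_ definition above) =====
theorem get_standardized_fieldnames_py_spec : Claim_equal_get_standardized_fieldnames_py := by
  intro businesses _
  show get_standardized_fieldnames_py businesses = get_standardized_fieldnames_py_alt businesses
  unfold get_standardized_fieldnames_py get_standardized_fieldnames_py_alt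
  exact main_eq _ (nodup_foldl_update businesses PySem.Set.empty (List.nodup_nil))
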